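-- pv_equiv track=rewrite | github.com/Nikhil1O1/MyGItLab | temp.py | pairCount
-- ===== SOURCE A (Python) =====
-- def pairCount(n):
-- 	result = -1
-- 	arr = []
-- 	for r in range(n+1):
-- 		arr.append([0 for c in range(n+1)])
-- 	for i in range(n+1):
-- 		for j in range(n+1):
-- 			temp = i+j
-- 			if arr[i][j]==0:
-- 				if temp<=n:
-- 					if (temp == (int(i)^int(j))):
-- 						result+=2
-- 						arr[i][j] = 1
-- 						arr[j][i] = 1
--
-- 	return(result%(1000000009))
-- ===== SOURCE B (Python) =====
-- def pairCount(n):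
--     # A counts, modulo MOD, minus one plus twice the number of unordered pairs
--     # (i, j) with i + j <= n and i + j == i ^ j (disjoint bits); that quantity
--     # equals the sum of two**popcount(m) over m up to n, computed here by a
--     # digit DP over the bits of N = n + 1: each set bit k of N contributes
--     # (two**ones_above) * (three**k).
--     MOD = 1000000009
--     N = n + 1
--     total = 0
--     ones = 0
--     for k in reversed(range(N.bit_length())):
--         if (N >> k) & 1:
--             total += (1 << ones) * 3 ** k
--             ones += 1
--     return total % MOD
-- ===== Notes on version B (the rewrite author's own statement) =====
-- stated objective: faster
-- what changed: A fills an (n+1)x(n+1) marking matrix and scans all pairs (i,j) testing i+j==i^j; B computes the same total (minus one plus twice the unordered-pair count, which equals the sum of two^popcount(m) for m up to n) by a digit DP over the bits of n+1, with no matrix and no pair scan.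
-- outside the precondition, e.g. on pairCount(-1): A returns 1000000008, B returns 0
import Mathlib
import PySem

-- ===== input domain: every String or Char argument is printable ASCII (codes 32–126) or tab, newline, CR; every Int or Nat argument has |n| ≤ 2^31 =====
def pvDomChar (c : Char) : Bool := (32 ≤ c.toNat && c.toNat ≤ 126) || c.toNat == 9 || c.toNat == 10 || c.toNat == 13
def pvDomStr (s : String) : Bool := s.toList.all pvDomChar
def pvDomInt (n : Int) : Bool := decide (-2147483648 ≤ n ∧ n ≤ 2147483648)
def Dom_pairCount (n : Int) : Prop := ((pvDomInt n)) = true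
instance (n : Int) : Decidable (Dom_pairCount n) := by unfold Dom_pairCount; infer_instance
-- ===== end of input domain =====

-- B re-implements A's O(n^2) pair-marking scan as an O(log n) digit DP over the bits of n+1.

-- ===== PORT A =====
-- inner loop body (the `for j in range(n+1)` body); all arr indices reached are in
-- range, where pyGetD/pySetD are exact
def pairCountInner (n : Int) (st : Int × List (List Int)) (i j : Int) : Int × List (List Int) :=
  let temp := i + j
  if PySem.List.pyGetD (PySem.List.pyGetD st.2 i []) j 0 = 0 then
    if temp ≤ n then
      if temp = PySem.Int.bxor i j then
        let arr1 := PySem.List.pySetD st.2 i (PySem.List.pySetD (PySem.List.pyGetD st.2 i []) j 1)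
        let arr2 := PySem.List.pySetD arr1 j (PySem.List.pySetD (PySem.List.pyGetD arr1 j []) i 1)
        (st.1 + 2, arr2)
      else st
    else st
  else st

-- the `for i in range(n+1)` body
def pairCountBody (n : Int) (st : Int × List (List Int)) (i : Int) : Int × List (List Int) :=
  (PySem.List.pyRange 0 (n+1) 1).foldl (fun st j => pairCountInner n st i j) st

def pairCount (n : Int) : Int :=
  let arr : List (List Int) :=
    (PySem.List.pyRange 0 (n+1) 1).foldl
      (fun arr _r => arr ++ [(PySem.List.pyRange 0 (n+1) 1).map fun _c => (0:Int)]) []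
  let st : Int × List (List Int) :=
    (PySem.List.pyRange 0 (n+1) 1).foldl (pairCountBody n) (-1, arr)
  PySem.Int.mod st.1 1000000009

-- ===== PORT B =====
-- loop body; Python's `N >> k` / `1 << ones` are Lean's `>>> k.toNat` / `<<< ones.toNat`
-- (k and ones are never negative here, so .toNat is exact)
def pairCountAltStep (N : Int) (st : Int × Int) (k : Int) : Int × Int :=
  if PySem.Int.band (N >>> k.toNat) 1 ≠ 0 then
    (st.1 + ((1:Int) <<< st.2.toNat) * 3 ^ k.toNat, st.2 + 1)
  else st

def pairCount_alt (n : Int) : Int :=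
  let MOD : Int := 1000000009
  let N : Int := n + 1
  let st : Int × Int :=
    ((PySem.List.pyRange 0 ((PySem.Int.bitLength N : Nat) : Int) 1).reverse).foldl
      (pairCountAltStep N) (0, 0)
  PySem.Int.mod st.1 MOD

-- ===== PRECONDITION & SPEC =====
-- Pre_ excludes negative n, which is outside the task's natural domain (a pair count):
-- there A's seed of minus one survives the empty loops and A returns the modulus minus one
-- (an artefact of its implementation), while B's empty bit scan returns zero.
def Pre_pairCount (n : Int) : Prop := 0 ≤ n
instance (n : Int) : Decidable (Pre_pairCount n) := by unfold Pre_pairCount; infer_instance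
def pvWitness_pairCount : Int := 5

def Spec_pairCount (n : Int) (out : Int) : Prop := out = pairCount_alt n
instance (n : Int) (out : Int) : Decidable (Spec_pairCount n out) := by unfold Spec_pairCount; infer_instance

-- ===== CLAIM (what is proved, stated in full; the proofs are below) =====
def Claim_equal_pairCount : Prop := ∀ (n : Int), Dom_pairCount n → Pre_pairCount n → Spec_pairCount n (pairCount n)

-- ===== LEMMAS AND PROOFS =====

-- popcount
def pvPc : Nat → Nat
  | 0 => 0
  | (m+1) => (m+1) % 2 + pvPc ((m+1)/2)
decreasing_by exact Nat.div_lt_self (Nat.succ_pos m) one_lt_two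

-- sum of 2^popcount over [0, N)
def pvG (N : Nat) : Nat := ∑ m ∈ Finset.range N, 2 ^ pvPc m

-- the condition A tests, over Nat (i+j ≤ n becomes i+j < W with W = n+1)
abbrev pvCond (W a b : Nat) : Prop := a + b < W ∧ a + b = a ^^^ b

-- matrix of values of f on [0,W) × [0,W)
def pvMat (W : Nat) (f : Nat → Nat → Int) : List (List Int) :=
  (List.range W).map fun a => (List.range W).map fun b => f a b

-- contents of arr just before step (i, j): cell (a,b) is marked iff the condition
-- holds for {a,b} and the first of the two steps (a,b)/(b,a) precedes (i,j)
def pvMark (W i j : Nat) (a b : Nat) : Int :=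
  if pvCond W a b ∧ (min a b < i ∨ (min a b = i ∧ max a b < j)) then 1 else 0

def pvRow (W i : Nat) : Nat := ∑ b ∈ Finset.range W, if pvCond W i b ∧ i ≤ b then 1 else 0
def pvT (W i : Nat) : Nat := ∑ a ∈ Finset.range i, pvRow W a
def pvO (W : Nat) : Nat := ∑ a ∈ Finset.range W, ∑ b ∈ Finset.range W, if pvCond W a b then 1 else 0
def pvCm (m : Nat) : Nat := ∑ a ∈ Finset.range (m+1), if a ^^^ (m - a) = m then 1 else 0

theorem pv_pyRange_cast (m : Nat) :
    PySem.List.pyRange 0 (m : Int) 1 = (List.range m).map (fun k : Nat => (k : Int)) := by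
  rw [PySem.List.pyRange_one]; simp


theorem pv_foldl_append_const {α β : Type} (l : List α) (init : List β) (c : β) :
    l.foldl (fun acc _ => acc ++ [c]) init = init ++ l.map (fun _ => c) := by
  induction l generalizing init with
  | nil => simp
  | cons x xs ih => simp [List.foldl, ih]


theorem pv_mat_getD (W : Nat) (f : Nat → Nat → Int) (a : Nat) (ha : a < W) :
    PySem.List.pyGetD (pvMat W f) (a : Int) [] = (List.range W).map (f a) := by
  simp [pvMat, List.getD_eq_getElem?_getD, ha]


theorem pv_row_getD (W : Nat) (g : Nat → Int) (b : Nat) (hb : b < W) :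
    PySem.List.pyGetD ((List.range W).map g) (b : Int) 0 = g b := by
  simp [List.getD_eq_getElem?_getD, hb]


theorem pv_set_map_range {α : Type} (g : Nat → α) (W k : Nat) (v : α) (_hk : k < W) :
    ((List.range W).map g).set k v = (List.range W).map (fun t => if t = k then v else g t) := by
  apply List.ext_getElem (by simp)
  intro y hy1 hy2
  simp only [List.length_set, List.length_map, List.length_range] at hy1 hy2
  rw [List.getElem_set]
  simp only [List.getElem_map, List.getElem_range]
  by_cases h : k = y
  · subst h; simp
  · rw [if_neg h, if_neg (fun hq => h hq.symm)]

theorem pv_mat_setCell (W : Nat) (f : Nat → Nat → Int) (a b : Nat) (v : Int)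
    (ha : a < W) (hb : b < W) :
    PySem.List.pySetD (pvMat W f) (a : Int)
      (PySem.List.pySetD ((List.range W).map (f a)) (b : Int) v)
      = pvMat W (fun x y => if x = a ∧ y = b then v else f x y) := by
  simp only [PySem.List.pySetD_natCast]
  unfold pvMat
  rw [pv_set_map_range _ W b v hb, pv_set_map_range _ W a _ ha]
  apply List.map_congr_left
  intro t _
  by_cases hta : t = a
  · subst hta
    rw [if_pos rfl]
    apply List.map_congr_left
    intro s _
    by_cases hsb : s = b
    · subst hsb; simp
    · simp [hsb]
  · rw [if_neg hta]
    apply List.map_congr_left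
    intro s _
    have h : ¬ (t = a ∧ s = b) := fun h => hta h.1
    simp [h]

theorem pv_mark_self (W i j : Nat) :
    pvMark W i j i j = if pvCond W i j ∧ j < i then 1 else 0 := by
  have h : (pvCond W i j ∧ (min i j < i ∨ (min i j = i ∧ max i j < j))) ↔
      (pvCond W i j ∧ j < i) := by
    constructor
    · rintro ⟨hc, h2⟩; exact ⟨hc, by omega⟩
    · rintro ⟨hc, h2⟩; exact ⟨hc, by omega⟩
  simp only [pvMark, h]


theorem pv_cond_symm (W a b : Nat) : pvCond W a b ↔ pvCond W b a := by
  constructor <;>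
    · rintro ⟨h1, h2⟩
      exact ⟨by omega, by rw [Nat.add_comm, Nat.xor_comm]; exact h2⟩


theorem pv_mark_adv (W i j : Nat) (hij : i ≤ j) (hc : pvCond W i j) :
    (fun x y => if x = j ∧ y = i then (1:Int) else if x = i ∧ y = j then 1 else pvMark W i j x y)
      = pvMark W i (j+1) := by
  funext x y
  by_cases h1 : x = j ∧ y = i
  · obtain ⟨rfl, rfl⟩ := h1
    have hcji : pvCond W x y := (pv_cond_symm W y x).mp hc
    have hp : min x y < y ∨ (min x y = y ∧ max x y < x + 1) := by omega
    simp only [pvMark]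
    simp only [true_and, if_true]
    rw [if_pos ⟨hcji, hp⟩]
  · by_cases h2 : x = i ∧ y = j
    · obtain ⟨rfl, rfl⟩ := h2
      have hp : min x y < x ∨ (min x y = x ∧ max x y < y + 1) := by omega
      have hr : (if pvCond W x y ∧ (min x y < x ∨ (min x y = x ∧ max x y < y + 1)) then (1:Int) else 0) = 1 := if_pos ⟨hc, hp⟩
      simp only [pvMark, true_and, if_true]
      rw [hr]
      split_ifs <;> rfl
    · simp only [if_neg h1, if_neg h2, pvMark]
      apply if_congr ?_ rfl rfl
      constructor
      · rintro ⟨hcxy, hp⟩; exact ⟨hcxy, by omega⟩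
      · rintro ⟨hcxy, hp⟩; exact ⟨hcxy, by omega⟩


theorem pv_mark_stay (W i j : Nat) (h : ¬ (pvCond W i j ∧ i ≤ j)) :
    pvMark W i j = pvMark W i (j+1) := by
  funext a b
  simp only [pvMark]
  apply if_congr ?_ rfl rfl
  constructor
  · rintro ⟨hc, hp⟩; exact ⟨hc, by omega⟩
  · rintro ⟨hc, hp⟩
    refine ⟨hc, ?_⟩
    by_contra hn
    have hmm : min a b = i ∧ max a b = j := by omega
    have hab : (a = i ∧ b = j) ∨ (a = j ∧ b = i) := by omega
    have hcij : pvCond W i j := by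
      rcases hab with ⟨rfl, rfl⟩ | ⟨rfl, rfl⟩
      · exact hc
      · exact (pv_cond_symm W a b).mp hc
    exact h ⟨hcij, by omega⟩


theorem pv_mark_next (W i : Nat) : pvMark W i W = pvMark W (i+1) 0 := by
  funext a b
  simp only [pvMark]
  apply if_congr ?_ rfl rfl
  constructor
  · rintro ⟨hc, hp⟩
    have hW := hc.1
    exact ⟨hc, by omega⟩
  · rintro ⟨hc, hp⟩
    have hW := hc.1
    exact ⟨hc, by omega⟩


theorem pv_mark_zero (W : Nat) : pvMark W 0 0 = fun _ _ => (0:Int) := by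
  funext a b
  unfold pvMark
  rw [if_neg]
  rintro ⟨_, hp⟩
  omega


theorem pv_inner_loop (n : Int) (W : Nat) (hW : n + 1 = (W : Int)) (i : Nat) (hi : i < W)
    (r : Int) : ∀ j, j ≤ W →
    List.foldl (fun st j => pairCountInner n st (i : Int) j) (r, pvMat W (pvMark W i 0))
        ((List.range j).map (fun k : Nat => (k : Int)))
      = (r + 2 * ((∑ b ∈ Finset.range j, if pvCond W i b ∧ i ≤ b then 1 else 0 : Nat) : Int),
         pvMat W (pvMark W i j)) := by
  intro j
  induction j with
  | zero => simp
  | succ j ih =>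
    intro hj1
    have hjW : j < W := by omega
    rw [List.range_succ, List.map_append, List.foldl_append, ih (by omega)]
    simp only [List.map_cons, List.map_nil, List.foldl_cons, List.foldl_nil]
    rw [Finset.sum_range_succ]
    simp only [pairCountInner]
    rw [pv_mat_getD W (pvMark W i j) i hi, pv_row_getD W (pvMark W i j i) j hjW, pv_mark_self]
    by_cases hc : pvCond W i j
    · by_cases hij : i ≤ j
      · have hnlt : ¬ (pvCond W i j ∧ j < i) := by rintro ⟨_, h⟩; omega
        rw [if_neg hnlt, if_pos rfl]
        have h1 : (i : Int) + (j : Int) ≤ n := by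
          have hx := hc.1
          omega
        rw [if_pos h1]
        have h2 : (i : Int) + (j : Int) = PySem.Int.bxor (i : Int) (j : Int) := by
          rw [PySem.Int.bxor_natCast]
          exact_mod_cast hc.2
        rw [if_pos h2]
        rw [pv_mat_setCell W (pvMark W i j) i j 1 hi hjW]
        rw [pv_mat_getD W _ j hjW]
        rw [pv_mat_setCell W _ j i 1 hjW hi]
        rw [pv_mark_adv W i j hij hc]
        rw [if_pos ⟨hc, hij⟩]
        simp only [Prod.mk.injEq]
        constructor
        · push_cast
          ring
        · trivial
      · have hlt : j < i := by omega
        rw [if_pos (show pvCond W i j ∧ j < i from ⟨hc, hlt⟩)]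
        rw [if_neg (by norm_num : ¬ ((1:Int) = 0))]
        rw [← pv_mark_stay W i j (by rintro ⟨_, h⟩; omega)]
        rw [if_neg (by rintro ⟨_, h⟩; omega : ¬ (pvCond W i j ∧ i ≤ j))]
        simp
    · have hnm : ¬ (pvCond W i j ∧ j < i) := fun h => hc h.1
      rw [if_neg hnm, if_pos rfl]
      rw [← pv_mark_stay W i j (fun h => hc h.1)]
      rw [if_neg (fun h : pvCond W i j ∧ i ≤ j => hc h.1)]
      by_cases hle : (i : Int) + (j : Int) ≤ n
      · rw [if_pos hle]
        have hxne : ¬ ((i : Int) + (j : Int) = PySem.Int.bxor (i : Int) (j : Int)) := by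
          rw [PySem.Int.bxor_natCast]
          intro h
          apply hc
          refine ⟨by omega, by exact_mod_cast h⟩
        rw [if_neg hxne]
        simp
      · rw [if_neg hle]
        simp


theorem pv_outer_loop (n : Int) (W : Nat) (hW : n + 1 = (W : Int)) :
    ∀ i, i ≤ W →
    List.foldl (pairCountBody n) (-1, pvMat W (pvMark W 0 0))
        ((List.range i).map (fun k : Nat => (k : Int)))
      = (-1 + 2 * ((pvT W i : Nat) : Int), pvMat W (pvMark W i 0)) := by
  intro i
  induction i with
  | zero => simp [pvT]
  | succ i ih =>
    intro hi1
    have hiW : i < W := by omega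
    rw [List.range_succ, List.map_append, List.foldl_append, ih (by omega)]
    simp only [List.map_cons, List.map_nil, List.foldl_cons, List.foldl_nil]
    unfold pairCountBody
    rw [hW, pv_pyRange_cast W]
    rw [pv_inner_loop n W hW i hiW _ W le_rfl]
    rw [pv_mark_next W i]
    have hT : pvT W (i+1) = pvT W i + pvRow W i := Finset.sum_range_succ _ _
    rw [hT]
    simp only [Prod.mk.injEq]
    constructor
    · unfold pvRow
      push_cast
      ring
    · trivial


theorem pv_A_eq (n : Int) (W : Nat) (hW : n + 1 = (W : Int)) :
    pairCount n = PySem.Int.mod (-1 + 2 * ((pvT W W : Nat) : Int)) 1000000009 := by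
  simp only [pairCount]
  rw [hW, pv_pyRange_cast W, pv_foldl_append_const]
  have harr : ([] : List (List Int)) ++ (((List.range W).map (fun k : Nat => (k : Int))).map
      (fun _ => ((List.range W).map (fun k : Nat => (k : Int))).map (fun _c => (0:Int))))
      = pvMat W (pvMark W 0 0) := by
    rw [pv_mark_zero]
    unfold pvMat
    simp only [List.nil_append, List.map_map, Function.comp_def]
  rw [harr, pv_outer_loop n W hW W le_rfl]


-- bit arithmetic
theorem pv_xor_even_even (a b : Nat) : (2*a) ^^^ (2*b) = 2*(a^^^b) := by
  have := Nat.xor_bit false a false b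
  simpa [Nat.bit, Nat.two_mul] using this

theorem pv_xor_even_odd (a b : Nat) : (2*a) ^^^ (2*b+1) = 2*(a^^^b)+1 := by
  have := Nat.xor_bit false a true b
  simpa [Nat.bit, Nat.two_mul] using this

theorem pv_xor_odd_even (a b : Nat) : (2*a+1) ^^^ (2*b) = 2*(a^^^b)+1 := by
  have := Nat.xor_bit true a false b
  simpa [Nat.bit, Nat.two_mul] using this

theorem pv_xor_odd_odd (a b : Nat) : (2*a+1) ^^^ (2*b+1) = 2*(a^^^b) := by
  have := Nat.xor_bit true a true b
  simpa [Nat.bit, Nat.two_mul] using this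

theorem pv_xor_le_add : ∀ a b : Nat, a ^^^ b ≤ a + b := by
  have H : ∀ n a b : Nat, a + b ≤ n → a ^^^ b ≤ a + b := by
    intro n
    induction n with
    | zero =>
      intro a b h
      have ha : a = 0 := by omega
      have hb : b = 0 := by omega
      subst ha; subst hb; simp
    | succ n ih =>
      intro a b h
      rcases Nat.even_or_odd a with ⟨x, hx⟩ | ⟨x, hx⟩ <;>
        rcases Nat.even_or_odd b with ⟨y, hy⟩ | ⟨y, hy⟩
      · have hx2 : a = 2*x := by omega
        have hy2 : b = 2*y := by omega
        subst hx2; subst hy2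
        rw [pv_xor_even_even]
        have := ih x y (by omega)
        omega
      · have hx2 : a = 2*x := by omega
        subst hx2; subst hy
        rw [pv_xor_even_odd]
        have := ih x y (by omega)
        omega
      · have hy2 : b = 2*y := by omega
        subst hx; subst hy2
        rw [pv_xor_odd_even]
        have := ih x y (by omega)
        omega
      · subst hx; subst hy
        rw [pv_xor_odd_odd]
        have := ih x y (by omega)
        omega
  intro a b
  exact H (a + b) a b le_rfl


theorem pv_pc_pos (m : Nat) (h : 0 < m) : pvPc m = m % 2 + pvPc (m / 2) := by
  cases m with
  | zero => omega
  | succ k => rw [pvPc]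


theorem pv_pc_even (h : Nat) : pvPc (2*h) = pvPc h := by
  rcases Nat.eq_zero_or_pos h with rfl | hpos
  · simp
  · rw [pv_pc_pos (2*h) (by omega)]
    have h1 : 2*h % 2 = 0 := by omega
    have h2 : 2*h / 2 = h := by omega
    rw [h1, h2]
    simp


theorem pv_pc_odd (h : Nat) : pvPc (2*h+1) = pvPc h + 1 := by
  rw [pv_pc_pos (2*h+1) (by omega)]
  have h1 : (2*h+1) % 2 = 1 := by omega
  have h2 : (2*h+1) / 2 = h := by omega
  rw [h1, h2, Nat.add_comm]


theorem pv_g_even (h : Nat) : pvG (2*h) = 3 * pvG h := by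
  induction h with
  | zero => simp [pvG]
  | succ h ih =>
    have e : 2*(h+1) = (2*h+1)+1 := by ring
    rw [e]
    unfold pvG
    rw [Finset.sum_range_succ, Finset.sum_range_succ, Finset.sum_range_succ]
    have ih' : ∑ m ∈ Finset.range (2*h), 2 ^ pvPc m = 3 * ∑ m ∈ Finset.range h, 2 ^ pvPc m := ih
    rw [ih', pv_pc_even, pv_pc_odd]
    ring


theorem pv_g_odd (h : Nat) : pvG (2*h+1) = 3 * pvG h + 2 ^ pvPc h := by
  unfold pvG
  rw [Finset.sum_range_succ]
  have : ∑ m ∈ Finset.range (2*h), 2 ^ pvPc m = 3 * ∑ m ∈ Finset.range h, 2 ^ pvPc m := pv_g_even h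
  rw [this, pv_pc_even]


theorem pv_sum_range_two_mul (f : Nat → Nat) (k : Nat) :
    ∑ a ∈ Finset.range (2*k), f a = ∑ x ∈ Finset.range k, (f (2*x) + f (2*x+1)) := by
  induction k with
  | zero => simp
  | succ k ih =>
    have e : 2*(k+1) = (2*k+1)+1 := by ring
    rw [e, Finset.sum_range_succ, Finset.sum_range_succ, ih, Finset.sum_range_succ]
    ring


theorem pv_cm_odd (h : Nat) : pvCm (2*h+1) = 2 * pvCm h := by
  unfold pvCm
  have e0 : 2*h+1+1 = 2*(h+1) := by ring
  rw [e0, pv_sum_range_two_mul, Finset.mul_sum]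
  apply Finset.sum_congr rfl
  intro x hx
  have hxh : x ≤ h := by simpa [Nat.lt_succ_iff] using hx
  have e1 : 2*h+1-2*x = 2*(h-x)+1 := by omega
  have e2 : 2*h+1-(2*x+1) = 2*(h-x) := by omega
  rw [e1, e2, pv_xor_even_odd, pv_xor_odd_even]
  have i1 : (2*(x^^^(h-x))+1 = 2*h+1) ↔ (x^^^(h-x) = h) := by omega
  simp only [i1]
  split_ifs <;> ring


theorem pv_cm_even (h : Nat) (_hpos : 0 < h) : pvCm (2*h) = pvCm h := by
  unfold pvCm
  rw [Finset.sum_range_succ, Finset.sum_range_succ]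
  have hlast1 : (2*h) ^^^ (2*h - 2*h) = 2*h := by simp
  have hlast2 : h ^^^ (h - h) = h := by simp
  rw [if_pos hlast1, if_pos hlast2]
  congr 1
  rw [pv_sum_range_two_mul]
  apply Finset.sum_congr rfl
  intro x hx
  have hxh : x < h := Finset.mem_range.mp hx
  have e1 : 2*h-2*x = 2*(h-x) := by omega
  have e2 : 2*h-(2*x+1) = 2*(h-x-1)+1 := by omega
  rw [e1, e2, pv_xor_even_even, pv_xor_odd_odd]
  have i1 : (2*(x^^^(h-x)) = 2*h) ↔ (x^^^(h-x) = h) := by omega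
  have hle := pv_xor_le_add x (h-x-1)
  have i2 : ¬ (2*(x^^^(h-x-1)) = 2*h) := by omega
  simp only [i1, i2, if_false]
  split_ifs <;> rfl


theorem pv_cm_eq_pow (m : Nat) : pvCm m = 2 ^ pvPc m := by
  induction m using Nat.strong_induction_on with
  | _ m ih =>
    rcases Nat.eq_zero_or_pos m with rfl | hpos
    · simp [pvCm, pvPc]
    · rcases Nat.even_or_odd m with ⟨x, hx⟩ | ⟨x, hx⟩
      · have hm : m = 2*x := by omega
        have hx1 : 0 < x := by omega
        subst hm
        rw [pv_cm_even x hx1, ih x (by omega), pv_pc_even]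
      · subst hx
        rw [pv_cm_odd x, ih x (by omega), pv_pc_odd, pow_succ]
        ring


theorem pv_O_eq_sum_cm (W : Nat) : pvO W = ∑ m ∈ Finset.range W, pvCm m := by
  induction W with
  | zero => simp [pvO]
  | succ W ih =>
    rw [Finset.sum_range_succ, ← ih]
    unfold pvO
    have split : ∀ a b : Nat, (if pvCond (W+1) a b then (1:Nat) else 0)
        = (if pvCond W a b then 1 else 0) + (if (a+b = W ∧ a+b = a^^^b) then 1 else 0) := by
      intro a b
      by_cases hx : a + b = a ^^^ b
      · simp only [pvCond, hx, and_true]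
        split_ifs <;> omega
      · simp only [pvCond]
        rw [if_neg (fun h => hx h.2), if_neg (fun h => hx h.2), if_neg (fun h => hx h.2)]
    have p0 : ∑ a ∈ Finset.range (W+1), ∑ b ∈ Finset.range (W+1), (if pvCond (W+1) a b then (1:Nat) else 0)
        = (∑ a ∈ Finset.range (W+1), ∑ b ∈ Finset.range (W+1), if pvCond W a b then (1:Nat) else 0)
          + (∑ a ∈ Finset.range (W+1), ∑ b ∈ Finset.range (W+1), if (a+b = W ∧ a+b = a^^^b) then (1:Nat) else 0) := by
      rw [← Finset.sum_add_distrib]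
      apply Finset.sum_congr rfl
      intro a _
      rw [← Finset.sum_add_distrib]
      apply Finset.sum_congr rfl
      intro b _
      exact split a b
    have p1 : ∑ a ∈ Finset.range (W+1), ∑ b ∈ Finset.range (W+1), (if pvCond W a b then (1:Nat) else 0) = pvO W := by
      rw [Finset.sum_range_succ]
      have hz : ∑ b ∈ Finset.range (W+1), (if pvCond W W b then (1:Nat) else 0) = 0 := by
        apply Finset.sum_eq_zero
        intro b _
        rw [if_neg]
        rintro ⟨h1, _⟩
        omega
      rw [hz, add_zero]
      unfold pvO
      apply Finset.sum_congr rfl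
      intro a _
      rw [Finset.sum_range_succ, if_neg (by rintro ⟨h1, _⟩; omega), add_zero]
    have p2 : ∑ a ∈ Finset.range (W+1), ∑ b ∈ Finset.range (W+1), (if (a+b = W ∧ a+b = a^^^b) then (1:Nat) else 0) = pvCm W := by
      unfold pvCm
      apply Finset.sum_congr rfl
      intro a ha
      have haW : a ≤ W := by simpa [Nat.lt_succ_iff] using ha
      rw [Finset.sum_eq_single (W - a)]
      · have e : a + (W - a) = W := by omega
        rw [e]
        have hiff : (W = W ∧ W = a ^^^ (W - a)) ↔ (a ^^^ (W - a) = W) := by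
          constructor
          · rintro ⟨_, h2⟩; omega
          · intro h2; exact ⟨rfl, h2.symm⟩
        exact if_congr hiff rfl rfl
      · intro b _ hbne
        rw [if_neg]
        rintro ⟨h1, _⟩
        exact hbne (by omega)
      · intro hmem
        exact absurd (Finset.mem_range.mpr (by omega)) hmem
    rw [p0, p1, p2]
    rfl


theorem pv_O_succ_T (W : Nat) (hW : 0 < W) : pvO W + 1 = 2 * pvT W W := by
  have key : ∀ a b : Nat, (if pvCond W a b then (1:Nat) else 0) + (if pvCond W a b ∧ a = b then 1 else 0)
      = (if pvCond W a b ∧ a ≤ b then 1 else 0) + (if pvCond W a b ∧ b ≤ a then 1 else 0) := by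
    intro a b
    by_cases hC : pvCond W a b
    · rw [if_pos hC, if_congr (and_iff_right hC) rfl rfl, if_congr (and_iff_right hC) rfl rfl,
        if_congr (and_iff_right hC) rfl rfl]
      split_ifs <;> omega
    · rw [if_neg hC, if_neg (fun h => hC h.1), if_neg (fun h => hC h.1), if_neg (fun h => hC h.1)]
  have symm : (∑ a ∈ Finset.range W, ∑ b ∈ Finset.range W, if pvCond W a b ∧ b ≤ a then (1:Nat) else 0)
      = ∑ a ∈ Finset.range W, ∑ b ∈ Finset.range W, if pvCond W a b ∧ a ≤ b then (1:Nat) else 0 := by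
    rw [Finset.sum_comm]
    apply Finset.sum_congr rfl
    intro a _
    apply Finset.sum_congr rfl
    intro b _
    exact if_congr (and_congr (pv_cond_symm W b a) Iff.rfl) rfl rfl
  have seq : (∑ a ∈ Finset.range W, ∑ b ∈ Finset.range W, if pvCond W a b ∧ a = b then (1:Nat) else 0) = 1 := by
    have inner : ∀ a ∈ Finset.range W, (∑ b ∈ Finset.range W, if pvCond W a b ∧ a = b then (1:Nat) else 0) = if a = 0 then 1 else 0 := by
      intro a ha
      rw [Finset.sum_eq_single a]
      · have hiff : (pvCond W a a ∧ a = a) ↔ a = 0 := by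
          constructor
          · rintro ⟨⟨h1, h2⟩, _⟩
            rw [Nat.xor_self] at h2
            omega
          · rintro rfl
            exact ⟨⟨by omega, by simp⟩, rfl⟩
        exact if_congr hiff rfl rfl
      · intro b _ hbne
        rw [if_neg]
        rintro ⟨_, h⟩
        exact hbne h.symm
      · intro hmem
        exact absurd ha hmem
    rw [Finset.sum_congr rfl inner, Finset.sum_ite_eq' (Finset.range W) 0 (fun _ => 1),
      if_pos (Finset.mem_range.mpr hW)]
  have main : (∑ a ∈ Finset.range W, ∑ b ∈ Finset.range W, if pvCond W a b then (1:Nat) else 0)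
      + (∑ a ∈ Finset.range W, ∑ b ∈ Finset.range W, if pvCond W a b ∧ a = b then (1:Nat) else 0)
      = (∑ a ∈ Finset.range W, ∑ b ∈ Finset.range W, if pvCond W a b ∧ a ≤ b then (1:Nat) else 0)
      + (∑ a ∈ Finset.range W, ∑ b ∈ Finset.range W, if pvCond W a b ∧ b ≤ a then (1:Nat) else 0) := by
    rw [← Finset.sum_add_distrib]
    conv_rhs => rw [← Finset.sum_add_distrib]
    apply Finset.sum_congr rfl
    intro a _
    rw [← Finset.sum_add_distrib]
    conv_rhs => rw [← Finset.sum_add_distrib]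
    apply Finset.sum_congr rfl
    intro b _
    exact key a b
  have eO : pvO W = ∑ a ∈ Finset.range W, ∑ b ∈ Finset.range W, if pvCond W a b then (1:Nat) else 0 := rfl
  have eT : pvT W W = ∑ a ∈ Finset.range W, ∑ b ∈ Finset.range W, if pvCond W a b ∧ a ≤ b then (1:Nat) else 0 := by
    unfold pvT pvRow
    rfl
  omega


-- B side
theorem pv_B_loop (Nn : Nat) : ∀ k : Nat,
    List.foldl (pairCountAltStep (Nn : Int))
        (((pvG (Nn >>> k) : Nat) : Int) * 3 ^ k, ((pvPc (Nn >>> k) : Nat) : Int))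
        ((List.range k).reverse.map (fun t : Nat => (t : Int)))
      = (((pvG Nn : Nat) : Int), ((pvPc Nn : Nat) : Int)) := by
  intro k
  induction k with
  | zero =>
    simp
  | succ k ih =>
    rw [List.range_succ, List.reverse_append]
    have hdiv : Nn >>> (k+1) = (Nn >>> k) / 2 := by
      rw [Nat.shiftRight_succ]
    have hstep : pairCountAltStep (Nn : Int)
        (((pvG (Nn >>> (k+1)) : Nat) : Int) * 3 ^ (k+1), ((pvPc (Nn >>> (k+1)) : Nat) : Int))
        ((k : Nat) : Int)
        = (((pvG (Nn >>> k) : Nat) : Int) * 3 ^ k, ((pvPc (Nn >>> k) : Nat) : Int)) := by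
      unfold pairCountAltStep
      have htn : ((k : Nat) : Int).toNat = k := Int.toNat_natCast k
      rw [htn]
      have hsh : ((Nn : Int) >>> k) = ((Nn >>> k : Nat) : Int) := by
        exact_mod_cast Int.natCast_shiftRight Nn k
      rw [hsh]
      have hband : PySem.Int.band ((Nn >>> k : Nat) : Int) 1 = (((Nn >>> k) % 2 : Nat) : Int) := by
        have h := PySem.Int.band_natCast (Nn >>> k) 1
        simpa [Nat.and_one_is_mod] using h
      rw [hband]
      by_cases hb : (Nn >>> k) % 2 = 1
      · rw [if_pos (by simp [hb])]
        have hHo : Nn >>> k = 2 * (Nn >>> (k+1)) + 1 := by omega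
        simp only [Prod.mk.injEq]
        constructor
        · rw [hHo, pv_g_odd, Int.toNat_natCast, Int.shiftLeft_eq]
          push_cast [pow_succ]
          ring
        · rw [hHo, pv_pc_odd]
          push_cast
          ring
      · rw [if_neg (by simp; omega)]
        have hHe : Nn >>> k = 2 * (Nn >>> (k+1)) := by omega
        simp only [Prod.mk.injEq]
        constructor
        · rw [hHe, pv_g_even]
          push_cast [pow_succ]
          ring
        · rw [hHe, pv_pc_even]
    simp only [List.reverse_singleton, List.map_cons, List.singleton_append,
      List.foldl_cons]
    rw [hstep]
    exact ih


theorem pv_B_eq (n : Int) (W : Nat) (hW : n + 1 = (W : Int)) :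
    pairCount_alt n = PySem.Int.mod ((pvG W : Nat) : Int) 1000000009 := by
  simp only [pairCount_alt]
  rw [hW, pv_pyRange_cast (PySem.Int.bitLength ((W : Nat) : Int)), ← List.map_reverse]
  have h0 : W >>> (PySem.Int.bitLength ((W : Nat) : Int)) = 0 := by
    have h1 : ((W : Nat) : Int).natAbs < 2 ^ PySem.Int.bitLength ((W : Nat) : Int) :=
      PySem.Int.lt_two_pow_bitLength _
    rw [Int.natAbs_natCast] at h1
    rw [Nat.shiftRight_eq_div_pow]
    exact Nat.div_eq_of_lt h1
  have hloop := pv_B_loop W (PySem.Int.bitLength ((W : Nat) : Int))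
  rw [h0] at hloop
  have hg0 : pvG 0 = 0 := by simp [pvG]
  have hp0 : pvPc 0 = 0 := by simp [pvPc]
  rw [hg0, hp0] at hloop
  simp only [Nat.cast_zero, zero_mul] at hloop
  rw [hloop]


-- ===== VERDICT (by name: the statement is the Claim_ definition above) =====
theorem pairCount_spec : Claim_equal_pairCount := by
  unfold Claim_equal_pairCount
  intro n _ hpre
  unfold Spec_pairCount
  have hpre' : (0:Int) ≤ n := hpre
  set W : Nat := (n+1).toNat with hWdef
  have hW : n + 1 = (W : Int) := by simp [hWdef]; omega
  have hWpos : 0 < W := by omega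
  rw [pv_A_eq n W hW, pv_B_eq n W hW]
  congr 1
  have h1 : pvG W = pvO W := by
    rw [pv_O_eq_sum_cm]
    unfold pvG
    exact Finset.sum_congr rfl (fun m _ => (pv_cm_eq_pow m).symm)
  have h2 := pv_O_succ_T W hWpos
  rw [h1]
  omega
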